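-- pv_equiv track=rewrite | github.com/tanhongsheng050204-code/UMHackathon-DaddiesTrip | backend/agents/base_agent.py | _count_open_brackets
-- ===== SOURCE A (Python) =====
-- def _count_open_brackets(s):
--     """Return a stack of unmatched openers in s, respecting string literals."""
--     stack = []
--     in_string = False
--     escape = False
--     for ch in s:
--         if escape:
--             escape = False
--             continue
--         if ch == '\\':
--             escape = True
--             continue
--         if ch == '"':
--             in_string = not in_string
--             continue
--         if in_string:
--             continue
--         if ch in ('{', '['):
--             stack.append(ch)
--         elif ch == '}' and stack and stack[-1] == '{':
--             stack.pop()
--         elif ch == ']' and stack and stack[-1] == '[':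
--             stack.pop()
--     return stack
-- ===== SOURCE B (Python) =====
-- def _count_open_brackets(s):
--     """Two-pass: first filter out string literals/escapes, then run a plain stack pass."""
--     active = []
--     in_string = False
--     escape = False
--     for ch in s:
--         if escape:
--             escape = False
--         elif ch == '\\':
--             escape = True
--         elif ch == '"':
--             in_string = not in_string
--         elif not in_string:
--             active.append(ch)
--     stack = []
--     for ch in active:
--         if ch in ('{', '['):
--             stack.append(ch)
--         elif ch == '}' and stack and stack[-1] == '{':
--             stack.pop()
--         elif ch == ']' and stack and stack[-1] == '[':
--             stack.pop()
--     return stack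
-- ===== Notes on version B (the rewrite author's own statement) =====
-- stated objective: alternative
-- what changed: B splits A's single stateful loop into two passes: a first pass that strips escapes, backslashes, quotes and string-literal contents into a filtered character list, and a second plain stack pass over that list.
import Mathlib
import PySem

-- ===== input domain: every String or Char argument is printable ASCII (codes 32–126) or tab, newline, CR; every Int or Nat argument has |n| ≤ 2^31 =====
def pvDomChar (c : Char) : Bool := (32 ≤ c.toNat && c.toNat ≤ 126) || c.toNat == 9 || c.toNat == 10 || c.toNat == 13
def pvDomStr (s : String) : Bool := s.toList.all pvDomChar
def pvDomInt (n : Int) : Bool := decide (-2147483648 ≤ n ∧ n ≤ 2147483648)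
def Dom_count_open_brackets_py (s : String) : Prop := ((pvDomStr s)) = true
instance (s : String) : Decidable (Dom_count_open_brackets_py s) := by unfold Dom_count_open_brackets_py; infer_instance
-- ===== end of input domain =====

-- ===== PORT A =====
-- state: (stack, in_string, escape); one step of A's loop body, branches in A's order
def cobStepA (st : List String × Bool × Bool) (ch : Char) : List String × Bool × Bool :=
  let stack := st.1
  let in_string := st.2.1
  let escape := st.2.2
  if escape then (stack, in_string, false)
  else if ch = '\\' then (stack, in_string, true)
  else if ch = '"' then (stack, !in_string, escape)
  else if in_string then st
  else if ch = '{' ∨ ch = '[' then (stack ++ [ch.toString], in_string, escape)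
  else if ch = '}' ∧ stack ≠ [] ∧ stack.getLast? = some "{" then (stack.dropLast, in_string, escape)
  else if ch = ']' ∧ stack ≠ [] ∧ stack.getLast? = some "[" then (stack.dropLast, in_string, escape)
  else st

def count_open_brackets_py (s : String) : List String :=
  (s.toList.foldl cobStepA ([], false, false)).1

-- ===== PORT B =====
-- first pass of Source B: drop escaped chars, backslashes, quotes and in-string chars
def cobFilter : List Char → Bool → Bool → List Char
  | [], _, _ => []
  | ch :: cs, in_string, escape =>
    if escape then cobFilter cs in_string false
    else if ch = '\\' then cobFilter cs in_string true
    else if ch = '"' then cobFilter cs (!in_string) escape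
    else if in_string then cobFilter cs in_string escape
    else ch :: cobFilter cs in_string escape

-- second pass of Source B: plain bracket stack step
def cobPush (stack : List String) (ch : Char) : List String :=
  if ch = '{' ∨ ch = '[' then stack ++ [ch.toString]
  else if ch = '}' ∧ stack ≠ [] ∧ stack.getLast? = some "{" then stack.dropLast
  else if ch = ']' ∧ stack ≠ [] ∧ stack.getLast? = some "[" then stack.dropLast
  else stack

def count_open_brackets_py_alt (s : String) : List String :=
  (cobFilter s.toList false false).foldl cobPush []

-- ===== PRECONDITION & SPEC =====
def Spec_count_open_brackets_py (s : String) (out : List String) : Prop := out = count_open_brackets_py_alt s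
instance (s : String) (out : List String) : Decidable (Spec_count_open_brackets_py s out) := by unfold Spec_count_open_brackets_py; infer_instance

-- ===== CLAIM (what is proved, stated in full; the proofs are below) =====
def Claim_equal_count_open_brackets_py : Prop := ∀ (s : String), Dom_count_open_brackets_py s → Spec_count_open_brackets_py s (count_open_brackets_py s)

-- ===== LEMMAS AND PROOFS =====
theorem cob_main (cs : List Char) : ∀ (stack : List String) (ins esc : Bool),
    (cs.foldl cobStepA (stack, ins, esc)).1 = (cobFilter cs ins esc).foldl cobPush stack := by
  induction cs with
  | nil => intro stack ins esc; simp [cobFilter]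
  | cons ch cs ih =>
    intro stack ins esc
    by_cases he : esc = true
    · simp [cobFilter, cobStepA, he, ih]
    · simp only [Bool.not_eq_true] at he
      by_cases hb : ch = '\\'
      · simp [cobFilter, cobStepA, he, hb, ih]
      · by_cases hq : ch = '"'
        · simp [cobFilter, cobStepA, he, hq, ih]
        · by_cases hi : ins = true
          · simp [cobFilter, cobStepA, he, hb, hq, hi, ih]
          · simp only [Bool.not_eq_true] at hi
            subst he hi
            have hstep : cobStepA (stack, false, false) ch = (cobPush stack ch, false, false) := by
              simp only [cobStepA, cobPush]
              simp only [hb, hq, if_false, Bool.false_eq_true]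
              split_ifs <;> rfl
            have hfil : cobFilter (ch :: cs) false false = ch :: cobFilter cs false false := by
              simp [cobFilter, hb, hq]
            rw [List.foldl_cons, hstep, ih, hfil, List.foldl_cons]

-- ===== VERDICT (by name: the statement is the Claim_ definition above) =====
theorem count_open_brackets_py_spec : Claim_equal_count_open_brackets_py := by
  intro s _
  unfold Spec_count_open_brackets_py count_open_brackets_py count_open_brackets_py_alt
  exact cob_main s.toList [] false false
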